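-- pv_equiv track=rewrite | github.com/Ry4nW/python-wars | binarysearch/checkIfNumberIsPerfectSquare.py | solve
-- ===== SOURCE A (Python) =====
-- def solve(n):
--
--     if n == 0:
--         return True
--
--     left = 1
--     right = n
--
--     while left <= right:
--         mid = (left + right) >> 1
--
--         if ((mid * mid) == n):
--             return True
--
--         if (mid * mid < n):
--             left = mid + 1
--         else:
--             right = mid - 1
--
--     return False
-- ===== SOURCE B (Python) =====
-- def solve(n):
--     if n < 0:
--         return False
--     r = 0
--     while r * r < n:
--         r += 1
--     return r * r == n
-- ===== Notes on version B (the rewrite author's own statement) =====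
-- stated objective: simpler
-- what changed: Replaces the binary search over [1, n] (mid/left/right bookkeeping) with a direct linear scan for the least r with r*r >= n, followed by one equality check.
import Mathlib
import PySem

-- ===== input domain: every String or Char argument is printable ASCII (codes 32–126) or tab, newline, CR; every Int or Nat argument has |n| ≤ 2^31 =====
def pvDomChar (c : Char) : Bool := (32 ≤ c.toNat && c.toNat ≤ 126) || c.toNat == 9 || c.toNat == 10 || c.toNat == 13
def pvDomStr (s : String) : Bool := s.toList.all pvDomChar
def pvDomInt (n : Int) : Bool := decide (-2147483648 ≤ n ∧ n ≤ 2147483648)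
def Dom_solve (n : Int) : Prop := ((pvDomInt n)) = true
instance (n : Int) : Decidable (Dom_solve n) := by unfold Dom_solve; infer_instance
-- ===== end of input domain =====

-- B replaces A's binary search with a plain linear scan for the integer square root (simpler, not faster).

-- ===== PORT A =====
-- the while-loop of A, with state (left, right); n is fixed
def searchA (n left right : Int) : Bool :=
  if _h : left ≤ right then
    let mid := PySem.Int.floordiv (left + right) 2
    if mid * mid == n then true
    else if mid * mid < n then searchA n (mid + 1) right
    else searchA n left (mid - 1)
  else false
termination_by (right + 1 - left).toNat
decreasing_by
  · have := PySem.Int.floordiv_two_mid_bounds (lo := left) (hi := right) _h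
    omega
  · have := PySem.Int.floordiv_two_mid_bounds (lo := left) (hi := right) _h
    omega

def solve (n : Int) : Bool :=
  if n == 0 then true else searchA n 1 n

-- ===== PORT B =====
-- the while-loop of B: increment r until r*r ≥ n, then test equality
def loopB (n r : Int) : Bool :=
  if _h : r * r < n then loopB n (r + 1) else r * r == n
termination_by (n - r).toNat
decreasing_by
  have hr : r < n := by
    rcases Int.lt_or_le r 1 with h | h <;> nlinarith [mul_self_nonneg r]
  omega

def solve_alt (n : Int) : Bool :=
  if n < 0 then false else loopB n 0

-- ===== PRECONDITION & SPEC =====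
def Spec_solve (n : Int) (out : Bool) : Prop := out = solve_alt n
instance (n : Int) (out : Bool) : Decidable (Spec_solve n out) := by unfold Spec_solve; infer_instance

-- ===== CLAIM (what is proved, stated in full; the proofs are below) =====
def Claim_equal_solve : Prop := ∀ (n : Int), Dom_solve n → Spec_solve n (solve n)

-- ===== LEMMAS AND PROOFS =====

lemma searchA_iff (n : Int) :
    ∀ (k : Nat) (l r : Int), (r + 1 - l).toNat ≤ k → 1 ≤ l →
      (searchA n l r = true ↔ ∃ x, l ≤ x ∧ x ≤ r ∧ x * x = n) := by
  intro k
  induction k with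
  | zero =>
      intro l r hk hl
      rw [searchA]
      have hlr : ¬ l ≤ r := by omega
      simp only [hlr, dif_neg, not_false_iff]
      constructor
      · intro h; exact absurd h (by simp)
      · rintro ⟨x, hx1, hx2, _⟩; omega
  | succ k ih =>
      intro l r hk hl
      rw [searchA]
      by_cases hlr : l ≤ r
      · simp only [hlr, dif_pos]
        have hmid := PySem.Int.floordiv_two_mid_bounds (lo := l) (hi := r) hlr
        set mid := PySem.Int.floordiv (l + r) 2 with hmiddef
        by_cases heq : mid * mid = n
        · simp only [heq, beq_self_eq_true, if_true]
          constructor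
          · intro _; exact ⟨mid, hmid.1, hmid.2, heq⟩
          · intro _; trivial
        · have hne : (mid * mid == n) = false := by simp [heq]
          rw [hne]
          simp only [Bool.false_eq_true, if_false]
          by_cases hlt : mid * mid < n
          · simp only [hlt, if_true]
            rw [ih (mid + 1) r (by omega) (by omega)]
            constructor
            · rintro ⟨x, hx1, hx2, hx3⟩; exact ⟨x, by omega, hx2, hx3⟩
            · rintro ⟨x, hx1, hx2, hx3⟩
              refine ⟨x, ?_, hx2, hx3⟩
              -- x ≥ 1 and x*x = n > mid*mid with mid ≥ 1, so x > mid
              by_contra hxm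
              have hxmid : x ≤ mid := by omega
              have : x * x ≤ mid * mid :=
                mul_le_mul hxmid hxmid (by omega) (by omega)
              omega
          · simp only [hlt, if_false]
            rw [ih l (mid - 1) (by omega) hl]
            constructor
            · rintro ⟨x, hx1, hx2, hx3⟩; exact ⟨x, hx1, by omega, hx3⟩
            · rintro ⟨x, hx1, hx2, hx3⟩
              refine ⟨x, hx1, ?_, hx3⟩
              by_contra hxm
              have hmx : mid ≤ x := by omega
              have : mid * mid ≤ x * x :=
                mul_le_mul hmx hmx (by omega) (by omega)
              omega
      · simp only [hlr, dif_neg, not_false_iff]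
        constructor
        · intro h; exact absurd h (by simp)
        · rintro ⟨x, hx1, hx2, _⟩; omega

lemma loopB_iff (n : Int) :
    ∀ (k : Nat) (r : Int), (n - r).toNat ≤ k → 0 ≤ r →
      (loopB n r = true ↔ ∃ x, r ≤ x ∧ x * x = n) := by
  intro k
  induction k with
  | zero =>
      intro r hk hr
      rw [loopB]
      have hnr : ¬ r * r < n := by
        have hnle : n ≤ r := by omega
        rcases Int.lt_or_le r 1 with h | h <;> nlinarith [mul_self_nonneg r]
      simp only [hnr, dif_neg, not_false_iff, beq_iff_eq]
      constructor
      · intro h; exact ⟨r, le_refl r, h⟩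
      · rintro ⟨x, hx1, hx2⟩
        have : r * r ≤ x * x := mul_le_mul hx1 hx1 hr (by omega)
        omega
  | succ k ih =>
      intro r hk hr
      rw [loopB]
      by_cases hlt : r * r < n
      · simp only [hlt, dif_pos]
        have hrn : r < n := by
          rcases Int.lt_or_le r 1 with h | h <;> nlinarith [mul_self_nonneg r]
        rw [ih (r + 1) (by omega) (by omega)]
        constructor
        · rintro ⟨x, hx1, hx2⟩; exact ⟨x, by omega, hx2⟩
        · rintro ⟨x, hx1, hx2⟩
          refine ⟨x, ?_, hx2⟩
          by_contra hxr
          have hxe : x = r := by omega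
          rw [hxe] at hx2
          omega
      · simp only [hlt, dif_neg, not_false_iff, beq_iff_eq]
        constructor
        · intro h; exact ⟨r, le_refl r, h⟩
        · rintro ⟨x, hx1, hx2⟩
          have : r * r ≤ x * x := mul_le_mul hx1 hx1 hr (by omega)
          omega

lemma solve_iff (n : Int) : solve n = true ↔ ∃ x, 0 ≤ x ∧ x * x = n := by
  unfold solve
  by_cases h0 : n = 0
  · subst h0
    simp only [beq_self_eq_true, if_true, true_iff]
    exact ⟨0, le_refl 0, by ring⟩
  · have : (n == 0) = false := by simp [h0]
    rw [this]
    simp only [Bool.false_eq_true, if_false]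
    rw [searchA_iff n (n + 1 - 1).toNat 1 n (le_refl _) (le_refl 1)]
    constructor
    · rintro ⟨x, hx1, _, hx3⟩; exact ⟨x, by omega, hx3⟩
    · rintro ⟨x, hx0, hx2⟩
      have hx1 : 1 ≤ x := by
        rcases eq_or_lt_of_le hx0 with h | h
        · exfalso; apply h0; rw [← hx2, ← h]; ring
        · omega
      have hxn : x ≤ n := by nlinarith
      exact ⟨x, hx1, hxn, hx2⟩

lemma solve_alt_iff (n : Int) : solve_alt n = true ↔ ∃ x, 0 ≤ x ∧ x * x = n := by
  unfold solve_alt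
  by_cases hneg : n < 0
  · rw [if_pos hneg]
    simp only [Bool.false_eq_true, false_iff, not_exists]
    intro x hx
    nlinarith [hx.2, mul_self_nonneg x]
  · simp only [hneg, if_false]
    rw [loopB_iff n (n - 0).toNat 0 (le_refl _) (le_refl 0)]

-- ===== VERDICT (by name: the statement is the Claim_ definition above) =====
theorem solve_spec : Claim_equal_solve := by
  intro n _
  unfold Spec_solve
  exact Bool.eq_iff_iff.mpr ((solve_iff n).trans (solve_alt_iff n).symm)
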